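-- pv_equiv track=rewrite | github.com/ToChoSK/sariskyslovnik | technical data/skript.py | make_unique_urls
-- ===== SOURCE A (Python) =====
-- from collections import defaultdict, Counter
--
-- def make_unique_urls(items: list[dict]) -> list[dict]:
--     used = defaultdict(int)
--
--     for item in items:
--         base_url = item["url"]
--         used[base_url] += 1
--
--         if used[base_url] == 1:
--             continue
--
--         item["url"] = f"{base_url}-{used[base_url]}"
--
--     return items
-- ===== SOURCE B (Python) =====
-- def make_unique_urls(items: list[dict]) -> list[dict]:
--     # Two-pass group-then-rename: first group all item indices by their original
--     # url, then for each group leave the first occurrence alone and rewrite the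
--     # later occurrences by their rank (2, 3, ...) within the group.
--     groups = {}
--     for i, item in enumerate(items):
--         groups.setdefault(item["url"], []).append(i)
--     for url, idxs in groups.items():
--         for rank, i in enumerate(idxs[1:], start=2):
--             items[i]["url"] = f"{url}-{rank}"
--     return items
-- ===== Notes on version B (the rewrite author's own statement) =====
-- stated objective: alternative
-- what changed: Replaces A's single running-counter pass with a two-pass group-then-rename shape: one pass groups all item indices by their original url, then each group's later occurrences (never the first) are rewritten by their rank 2,3,... within the group.
import Mathlib
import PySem

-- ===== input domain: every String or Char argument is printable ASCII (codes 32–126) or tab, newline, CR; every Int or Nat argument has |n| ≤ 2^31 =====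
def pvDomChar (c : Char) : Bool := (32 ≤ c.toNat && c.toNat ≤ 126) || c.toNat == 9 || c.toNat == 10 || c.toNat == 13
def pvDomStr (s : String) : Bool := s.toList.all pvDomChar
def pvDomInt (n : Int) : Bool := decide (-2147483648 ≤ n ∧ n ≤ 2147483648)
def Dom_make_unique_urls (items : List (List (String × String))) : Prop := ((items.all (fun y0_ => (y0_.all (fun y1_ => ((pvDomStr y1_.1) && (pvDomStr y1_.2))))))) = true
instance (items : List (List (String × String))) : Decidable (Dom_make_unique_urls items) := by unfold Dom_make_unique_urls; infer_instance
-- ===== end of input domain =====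

-- B replaces A's single running-counter pass by a two-pass group-then-rename shape
-- (group item indices by original url, then rename each group's later occurrences by
-- their within-group rank); A and B mutate the item dicts in place and return the same
-- list object — the equivalence proved here is about the returned value.

-- shared dict primitives (each item is a Python dict, modelled as an association list)
def pvUrlOf (it : List (String × String)) : String := (PySem.Dict.mk it).getD "url" ""
def pvSetUrl (it : List (String × String)) (v : String) : List (String × String) :=
  ((PySem.Dict.mk it).insert "url" v).items

-- ===== PORT A =====
def pvAStep (st : PySem.Dict String Int × List (List (String × String)))
    (item : List (String × String)) : PySem.Dict String Int × List (List (String × String)) :=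
  let base := pvUrlOf item
  let c := st.1.getD base 0 + 1
  let used := st.1.insert base c
  if c == 1 then (used, st.2 ++ [item])
  else (used, st.2 ++ [pvSetUrl item (base ++ "-" ++ PySem.Int.toStr c)])

def make_unique_urls (items : List (List (String × String))) : List (List (String × String)) :=
  (items.foldl pvAStep ((PySem.Dict.empty : PySem.Dict String Int), [])).2

-- ===== PORT B =====
-- pass 1: groups.setdefault(item["url"], []).append(i)  ==  groups[k] = groups.get(k, []) + [i]
def pvGroupStep (d : PySem.Dict String (List Int)) (p : Int × List (String × String)) :
    PySem.Dict String (List Int) :=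
  d.modify (pvUrlOf p.2) [] (fun l => l ++ [p.1])

-- pass 2 inner step: items[i]["url"] = f"{url}-{rank}" for q = (rank, i); the indices i
-- come from enumerate in pass 1, so 0 ≤ i < len(items) and set/getElem? at i.toNat is exact
def pvRenameOne (u : String) (acc : List (List (String × String))) (q : Int × Int) :
    List (List (String × String)) :=
  acc.set q.2.toNat (pvSetUrl ((acc[q.2.toNat]?).getD []) (u ++ "-" ++ PySem.Int.toStr q.1))

-- for rank, i in enumerate(idxs[1:], start=2): ...
def pvRenameGroup (acc : List (List (String × String))) (g : String × List Int) :
    List (List (String × String)) :=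
  (PySem.List.enumerate (PySem.List.slice g.2 (some 1) none) 2).foldl (pvRenameOne g.1) acc

def make_unique_urls_alt (items : List (List (String × String))) : List (List (String × String)) :=
  let groups := (PySem.List.enumerate items 0).foldl pvGroupStep PySem.Dict.empty
  groups.items.foldl pvRenameGroup items

-- ===== PRECONDITION & SPEC =====
-- Pre_ excludes exactly the items lacking a "url" key: Python A (and B) raise KeyError there.
def Pre_make_unique_urls (items : List (List (String × String))) : Prop :=
  ∀ it ∈ items, "url" ∈ it.map Prod.fst
instance (items : List (List (String × String))) : Decidable (Pre_make_unique_urls items) := by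
  unfold Pre_make_unique_urls; infer_instance

def pvWitness_make_unique_urls : (List (List (String × String))) :=
  [[("url", "a")], [("url", "b"), ("t", "x")], [("url", "a")]]

def Spec_make_unique_urls (items : List (List (String × String))) (out : List (List (String × String))) : Prop := out = make_unique_urls_alt items
instance (items : List (List (String × String))) (out : List (List (String × String))) : Decidable (Spec_make_unique_urls items out) := by unfold Spec_make_unique_urls; infer_instance

-- ===== CLAIM (what is proved, stated in full; the proofs are below) =====
def Claim_equal_make_unique_urls : Prop := ∀ (items : List (List (String × String))), Dom_make_unique_urls items → Pre_make_unique_urls items → Spec_make_unique_urls items (make_unique_urls items)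

-- ===== LEMMAS AND PROOFS =====

-- the common pointwise value: item j of the result, given the full original url list
def pvF (urls : List String) (j : Nat) (it : List (String × String)) : List (String × String) :=
  let k : Int := ((urls.take (j+1)).count (pvUrlOf it) : Nat)
  if k == 1 then it else pvSetUrl it (pvUrlOf it ++ "-" ++ PySem.Int.toStr k)

-- characterization of A's loop: process each item with the running count of urls seen so far
def pvGo (cnt : String → Int) : List (List (String × String)) → List (List (String × String))
  | [] => []
  | it :: rest =>
    let b := pvUrlOf it
    let c := cnt b + 1
    (if c == 1 then it else pvSetUrl it (b ++ "-" ++ PySem.Int.toStr c)) ::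
      pvGo (fun u => if u = b then c else cnt u) rest

-- the indices (with start offset s) of the items whose url is u
def pvOcc (items : List (List (String × String))) (u : String) (s : Int) : List Int :=
  ((PySem.List.enumerate items s).filter (fun p => pvUrlOf p.2 == u)).map (·.1)

theorem pvA_go (items : List (List (String × String))) :
    ∀ (used : PySem.Dict String Int) (acc : List (List (String × String))),
    (items.foldl pvAStep (used, acc)).2 = acc ++ pvGo (fun u => used.getD u 0) items := by
  induction items with
  | nil => intro used acc; simp [pvGo]
  | cons it rest ih =>
    intro used acc
    simp only [List.foldl_cons, pvGo]
    rw [show pvAStep (used, acc) it =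
        (used.insert (pvUrlOf it) (used.getD (pvUrlOf it) 0 + 1),
         acc ++ [if used.getD (pvUrlOf it) 0 + 1 == 1 then it
                 else pvSetUrl it (pvUrlOf it ++ "-" ++ PySem.Int.toStr (used.getD (pvUrlOf it) 0 + 1))]) from by
      simp only [pvAStep]; split <;> rfl]
    rw [ih]
    have hc : (fun u => (used.insert (pvUrlOf it) (used.getD (pvUrlOf it) 0 + 1)).getD u 0)
        = (fun u => if u = pvUrlOf it then used.getD (pvUrlOf it) 0 + 1 else used.getD u 0) := by
      funext u; exact PySem.Dict.getD_insert ..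
    rw [hc]
    simp

theorem pvGo_getElem? (rest : List (List (String × String))) :
    ∀ (pre : List String) (j : Nat),
    (pvGo (fun u => ((pre.count u : Nat) : Int)) rest)[j]? =
      rest[j]?.map (fun it => pvF (pre ++ rest.map pvUrlOf) (pre.length + j) it) := by
  induction rest with
  | nil => intro pre j; simp [pvGo]
  | cons it rest' ih =>
    intro pre j
    simp only [pvGo]
    cases j with
    | zero =>
      simp only [List.getElem?_cons_zero, Option.map_some, Nat.add_zero]
      have htake : (pre ++ (it :: rest').map pvUrlOf).take (pre.length + 1)
          = pre ++ [pvUrlOf it] := by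
        rw [List.map_cons, List.take_append]
        simp
      simp only [pvF, htake, List.count_append, List.count_singleton, beq_self_eq_true, if_true]
      push_cast
      split_ifs <;> rfl
    | succ j' =>
      have hc : (fun u => if u = pvUrlOf it then ((pre.count u : Nat) : Int) + 1
            else ((pre.count u : Nat) : Int))
          = (fun u => (((pre ++ [pvUrlOf it]).count u : Nat) : Int)) := by
        funext u
        by_cases hu : u = pvUrlOf it
        · simp [hu, List.count_append]
        · simp [hu, List.count_append, Ne.symm hu]
      have hcc : (fun u => if u = pvUrlOf it then ((pre.count (pvUrlOf it) : Nat) : Int) + 1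
            else ((pre.count u : Nat) : Int))
          = (fun u => (((pre ++ [pvUrlOf it]).count u : Nat) : Int)) := by
        rw [← hc]; funext u; by_cases hu : u = pvUrlOf it <;> simp [hu]
      simp only [List.getElem?_cons_succ]
      rw [hcc, ih (pre ++ [pvUrlOf it]) j']
      simp [Nat.add_assoc, Nat.add_comm 1 j']

theorem pvA_getElem? (items : List (List (String × String))) (j : Nat) :
    (make_unique_urls items)[j]? = items[j]?.map (fun it => pvF (items.map pvUrlOf) j it) := by
  unfold make_unique_urls
  rw [pvA_go items PySem.Dict.empty []]
  have h0 : (fun u => (PySem.Dict.empty : PySem.Dict String Int).getD u 0)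
      = (fun u : String => ((([] : List String).count u : Nat) : Int)) := by
    funext u; simp [PySem.Dict.getD_empty]
  rw [List.nil_append, h0, pvGo_getElem? items [] j]
  simp

theorem pvOcc_cons (it : List (String × String)) (rest : List (List (String × String)))
    (u : String) (s : Int) :
    pvOcc (it :: rest) u s = (if pvUrlOf it == u then [s] else []) ++ pvOcc rest u (s + 1) := by
  unfold pvOcc
  rw [PySem.List.enumerate_cons]
  simp only [List.filter_cons]
  cases pvUrlOf it == u
  · simp
  · simp

theorem pvOcc_getElem? (items : List (List (String × String))) :
    ∀ (s : Int) (u : String) (r : Nat) (i : Int),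
    (pvOcc items u s)[r]? = some i →
    ∃ (j : Nat) (h : j < items.length), i = s + (j : Int) ∧ pvUrlOf items[j] = u ∧
      ((items.map pvUrlOf).take (j + 1)).count u = r + 1 := by
  induction items with
  | nil =>
    intro s u r i h
    simp [pvOcc, PySem.List.enumerate_nil] at h
  | cons it rest ih =>
    intro s u r i h
    rw [pvOcc_cons] at h
    by_cases hu : pvUrlOf it == u
    · rw [if_pos hu] at h
      have hu' : pvUrlOf it = u := eq_of_beq hu
      cases r with
      | zero =>
        simp only [List.singleton_append, List.getElem?_cons_zero, Option.some.injEq] at h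
        refine ⟨0, by simp, by simp [← h], by simpa using hu', ?_⟩
        simp [hu']
      | succ r' =>
        simp only [List.singleton_append, List.getElem?_cons_succ] at h
        obtain ⟨j, hj, hi, hurl, hcnt⟩ := ih (s + 1) u r' i h
        refine ⟨j + 1, by simpa using Nat.succ_lt_succ hj, by rw [hi]; push_cast; ring, ?_, ?_⟩
        · simpa using hurl
        · simp only [List.map_cons, List.take_succ_cons, List.count_cons]
          rw [hcnt]
          simp [hu']
    · rw [if_neg hu, List.nil_append] at h
      have hu' : pvUrlOf it ≠ u := by simpa using hu
      obtain ⟨j, hj, hi, hurl, hcnt⟩ := ih (s + 1) u r i h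
      refine ⟨j + 1, by simpa using Nat.succ_lt_succ hj, by rw [hi]; push_cast; ring, ?_, ?_⟩
      · simpa using hurl
      · simp only [List.map_cons, List.take_succ_cons, List.count_cons]
        rw [hcnt]
        simp [hu']

theorem pvOcc_mem_iff (items : List (List (String × String))) (s : Int) (u : String) (i : Int) :
    i ∈ pvOcc items u s ↔
      ∃ (j : Nat) (h : j < items.length), i = s + (j : Int) ∧ pvUrlOf items[j] = u := by
  unfold pvOcc
  constructor
  · intro hi
    obtain ⟨p, hp, rfl⟩ := List.mem_map.mp hi
    have hp' := List.mem_filter.mp hp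
    obtain ⟨k, hk, rfl⟩ := (PySem.List.mem_enumerate_iff ..).mp hp'.1
    exact ⟨k, hk, rfl, by simpa using hp'.2⟩
  · rintro ⟨j, hj, rfl, hurl⟩
    apply List.mem_map.mpr
    refine ⟨(s + (j : Int), items[j]), List.mem_filter.mpr ⟨?_, by simp [hurl]⟩, rfl⟩
    exact (PySem.List.mem_enumerate_iff ..).mpr ⟨j, hj, rfl⟩

theorem pvOcc_ge (items : List (List (String × String))) (u : String) (s : Int) (i : Int)
    (h : i ∈ pvOcc items u s) : s ≤ i := by
  obtain ⟨j, hj, rfl, _⟩ := (pvOcc_mem_iff items s u i).mp h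
  omega

theorem pvOcc_nodup (items : List (List (String × String))) (u : String) (s : Int) :
    (pvOcc items u s).Nodup := by
  induction items generalizing s with
  | nil => simp [pvOcc, PySem.List.enumerate_nil]
  | cons it rest ih =>
    rw [pvOcc_cons]
    cases pvUrlOf it == u
    · simpa using ih (s + 1)
    · simp only [if_true, List.singleton_append, List.nodup_cons]
      refine ⟨fun hmem => ?_, ih (s + 1)⟩
      have := pvOcc_ge rest u (s + 1) s hmem
      omega

theorem pvFold_untouched (u : String) (j : Nat) :
    ∀ (qs : List (Int × Int)) (acc : List (List (String × String))),
    (∀ q ∈ qs, q.2.toNat ≠ j) → ((qs.foldl (pvRenameOne u) acc))[j]? = acc[j]? := by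
  intro qs
  induction qs with
  | nil => intro acc _; rfl
  | cons q qs' ih =>
    intro acc hq
    rw [List.foldl_cons, ih _ (fun p hp => hq p (List.mem_cons_of_mem _ hp))]
    exact List.getElem?_set_ne (hq q (List.mem_cons_self ..))

theorem pvRename_getElem? (u : String) (j : Nat) :
    ∀ (t : List Int), t.Nodup → (∀ i ∈ t, 0 ≤ i) → ∀ (s : Int) (acc : List (List (String × String))),
    ((PySem.List.enumerate t s).foldl (pvRenameOne u) acc)[j]? =
      match PySem.List.index? t ((j : Nat) : Int) with
      | none => acc[j]?
      | some r => acc[j]?.map (fun it => pvSetUrl it (u ++ "-" ++ PySem.Int.toStr (s + r))) := by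
  intro t
  induction t with
  | nil =>
    intro _ _ s acc
    simp [PySem.List.enumerate_nil, PySem.List.index?]
  | cons i t' ih =>
    intro hnd hpos s acc
    have hi0 : 0 ≤ i := hpos i (List.mem_cons_self ..)
    rw [PySem.List.enumerate_cons, List.foldl_cons]
    by_cases hij : i = ((j : Nat) : Int)
    · have hjt : ((j : Nat) : Int) ∉ t' := by
        intro hmem; exact (List.nodup_cons.mp hnd).1 (hij ▸ hmem)
      have hidx : PySem.List.index? (i :: t') ((j : Nat) : Int) = some 0 := by
        rw [hij]; exact PySem.List.index?_cons_self ..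
      rw [hidx]
      have hnone : PySem.List.index? t' ((j : Nat) : Int) = none :=
        (PySem.List.index?_eq_none_iff ..).mpr hjt
      rw [ih (List.nodup_cons.mp hnd).2
        (fun x hx => hpos x (List.mem_cons_of_mem _ hx)) (s + 1) _]
      rw [hnone]
      have hjn : i.toNat = j := by omega
      simp only [pvRenameOne, hjn]
      rw [List.getElem?_set_self']
      cases acc[j]?
      · simp
      · simp
    · have hne : i.toNat ≠ j := by omega
      have hacc : (pvRenameOne u acc (s, i))[j]? = acc[j]? := List.getElem?_set_ne hne
      rw [ih (List.nodup_cons.mp hnd).2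
        (fun x hx => hpos x (List.mem_cons_of_mem _ hx)) (s + 1) _]
      rw [PySem.List.index?_cons_of_ne _ hij]
      cases hidx : PySem.List.index? t' ((j : Nat) : Int) with
      | none => simp only [Option.map_none]; exact hacc
      | some r =>
        simp only [Option.map_some]
        rw [hacc]
        have : s + 1 + (r : Int) = s + ((r + 1 : Nat) : Int) := by push_cast; ring
        rw [this]

theorem pvGroups_getD (items : List (List (String × String))) (u : String) :
    ((PySem.List.enumerate items 0).foldl pvGroupStep PySem.Dict.empty).getD u []
      = pvOcc items u 0 := by
  have hrw : (PySem.List.enumerate items 0).foldl pvGroupStep PySem.Dict.empty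
      = (((PySem.List.enumerate items 0).map (fun p => (pvUrlOf p.2, p.1))).foldl
          (fun d q => d.modify q.1 [] (fun l => l ++ [q.2])) PySem.Dict.empty) := by
    rw [List.foldl_map]
    rfl
  rw [hrw, PySem.Dict.getD_foldl_modify_append, List.filter_map, List.map_map]
  simp only [PySem.Dict.getD_empty, List.nil_append, pvOcc]
  rfl

theorem pvGroups_items (items : List (List (String × String))) :
    ((PySem.List.enumerate items 0).foldl pvGroupStep PySem.Dict.empty).items
      = (PySem.Set.ofList (items.map pvUrlOf)).map (fun u => (u, pvOcc items u 0)) := by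
  have hkeys : ((PySem.List.enumerate items 0).foldl pvGroupStep PySem.Dict.empty).keys
      = PySem.Set.ofList (items.map pvUrlOf) := by
    have h := PySem.Dict.keys_foldl_modify_key (PySem.List.enumerate items 0)
      (fun p => pvUrlOf p.2) ([] : List Int) (fun _ p => (fun l => l ++ [p.1]))
      PySem.Dict.empty
    have hm : (PySem.List.enumerate items 0).map (fun p => pvUrlOf p.2)
        = items.map pvUrlOf := by
      rw [show (fun p : Int × List (String × String) => pvUrlOf p.2)
          = (pvUrlOf ∘ (fun p : Int × List (String × String) => p.2)) from rfl,
        ← List.map_map, PySem.List.map_snd_enumerate]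
    rw [hm] at h
    rw [show pvGroupStep = (fun d x => d.modify ((fun p : Int × List (String × String) =>
      pvUrlOf p.2) x) [] ((fun _ p => (fun l => l ++ [p.1]))
        (d : PySem.Dict String (List Int)) x)) from rfl]
    rw [h, PySem.Dict.keys_empty]
    rfl
  rw [PySem.Dict.items_eq_map_keys _ (by rw [hkeys]; exact PySem.Set.nodup_ofList _) [],
    hkeys]
  apply List.map_congr_left
  intro u _
  rw [pvGroups_getD]

theorem pvRenameGroup_skip (acc : List (List (String × String))) (g : String × List Int)
    (j : Nat) (h : ∀ i ∈ g.2.drop 1, i.toNat ≠ j) : (pvRenameGroup acc g)[j]? = acc[j]? := by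
  unfold pvRenameGroup
  rw [PySem.List.slice_from_one, ← List.drop_one]
  apply pvFold_untouched
  intro q hq
  obtain ⟨k, hk, rfl⟩ := (PySem.List.mem_enumerate_iff ..).mp hq
  exact h _ (List.getElem_mem ..)

theorem pvSkip (items : List (List (String × String))) (j : Nat) :
    ∀ (us : List String) (acc : List (List (String × String))),
    (∀ u' ∈ us, ∀ (j' : Nat) (_ : j' < items.length), pvUrlOf items[j'] = u' → j' ≠ j) →
    ((us.map (fun u => (u, pvOcc items u 0))).foldl pvRenameGroup acc)[j]? = acc[j]? := by
  intro us
  induction us with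
  | nil => intro acc _; rfl
  | cons u' us' ih =>
    intro acc hyp
    rw [List.map_cons, List.foldl_cons,
      ih _ (fun v hv => hyp v (List.mem_cons_of_mem _ hv))]
    apply pvRenameGroup_skip
    intro i hi hij
    have hmem : i ∈ pvOcc items u' 0 := List.mem_of_mem_drop hi
    obtain ⟨j', hj', hi0, hurl⟩ := (pvOcc_mem_iff items 0 u' i).mp hmem
    have : i.toNat = j' := by omega
    exact hyp u' (List.mem_cons_self ..) j' hj' hurl (this ▸ hij)

theorem pvB_getElem? (items : List (List (String × String))) (j : Nat) :
    (make_unique_urls_alt items)[j]? = items[j]?.map (fun it => pvF (items.map pvUrlOf) j it) := by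
  rw [show make_unique_urls_alt items
    = (((PySem.List.enumerate items 0).foldl pvGroupStep PySem.Dict.empty).items.foldl
        pvRenameGroup items) from rfl]
  rw [pvGroups_items]
  by_cases hj : j < items.length
  case neg =>
    -- out of range: nothing touches slot j, both sides are none
    rw [pvSkip items j _ items (fun u' _ j' hj' _ hje => by omega)]
    rw [List.getElem?_eq_none_iff.mpr (by omega)]
    rfl
  case pos =>
  set u := pvUrlOf items[j] with hu
  have humem : u ∈ PySem.Set.ofList (items.map pvUrlOf) := by
    rw [PySem.Set.mem_ofList]
    exact List.mem_map_of_mem (List.getElem_mem hj)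
  obtain ⟨s1, s2, hsplit⟩ := List.append_of_mem humem
  have hnd : (PySem.Set.ofList (items.map pvUrlOf)).Nodup := PySem.Set.nodup_ofList _
  rw [hsplit] at hnd
  have hs1 : u ∉ s1 := by
    intro hm; rw [List.nodup_append] at hnd
    exact hnd.2.2 u hm u (List.mem_cons_self ..) rfl
  have hs2 : u ∉ s2 := by
    rw [List.nodup_append, List.nodup_cons] at hnd
    exact hnd.2.1.1
  rw [hsplit, List.map_append, List.map_cons, List.foldl_append, List.foldl_cons]
  have hother : ∀ (t : List String), u ∉ t →
      ∀ u' ∈ t, ∀ (j' : Nat) (_ : j' < items.length), pvUrlOf items[j'] = u' → j' ≠ j := by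
    intro t hut u' hu' j' hj' hurl hje
    subst hje
    have : u' = u := (hu.trans hurl).symm
    exact hut (this ▸ hu')
  rw [pvSkip items j s2 _ (hother s2 hs2)]
  have hacc : ((s1.map (fun u => (u, pvOcc items u 0))).foldl pvRenameGroup items)[j]?
      = items[j]? := pvSkip items j s1 items (hother s1 hs1)
  rw [show pvRenameGroup ((s1.map (fun u => (u, pvOcc items u 0))).foldl pvRenameGroup items)
      (u, pvOcc items u 0)
    = ((PySem.List.enumerate ((pvOcc items u 0).drop 1) 2).foldl (pvRenameOne u)
        ((s1.map (fun u => (u, pvOcc items u 0))).foldl pvRenameGroup items)) from by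
    unfold pvRenameGroup
    rw [PySem.List.slice_from_one, ← List.drop_one]]
  rw [pvRename_getElem? u j ((pvOcc items u 0).drop 1)
    ((pvOcc_nodup items u 0).sublist (List.drop_sublist ..))
    (fun i hi => by have := pvOcc_ge items u 0 i (List.mem_of_mem_drop hi); omega) 2 _]
  cases hidx : PySem.List.index? ((pvOcc items u 0).drop 1) ((j : Nat) : Int) with
  | none =>
    have hmemocc : ((j : Nat) : Int) ∈ pvOcc items u 0 :=
      (pvOcc_mem_iff items 0 u _).mpr ⟨j, hj, by simp, hu.symm⟩
    obtain ⟨r0, hr0⟩ := List.mem_iff_getElem?.mp hmemocc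
    obtain ⟨j0, hj0, hje0, _, hcnt0⟩ := pvOcc_getElem? items 0 u r0 _ hr0
    have hjj0 : j0 = j := by omega
    rw [hjj0] at hcnt0
    have hr00 : r0 = 0 := by
      by_contra h0
      have hdr : ((pvOcc items u 0).drop 1)[r0 - 1]? = some ((j : Nat) : Int) := by
        rw [List.getElem?_drop, show 1 + (r0 - 1) = r0 by omega]
        exact hr0
      exact ((PySem.List.index?_eq_none_iff ..).mp hidx) (List.mem_of_getElem? hdr)
    rw [hr00] at hcnt0
    rw [hacc, List.getElem?_eq_getElem hj]
    simp [pvF, ← hu, hcnt0]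
  | some r =>
    obtain ⟨hrlt, hrval, -⟩ := PySem.List.getElem_of_index?_eq_some hidx
    have hocc : (pvOcc items u 0)[1 + r]? = some ((j : Nat) : Int) := by
      rw [← List.getElem?_drop, List.getElem?_eq_getElem hrlt, hrval]
    obtain ⟨j1, hj1, hje1, _, hcnt1⟩ := pvOcc_getElem? items 0 u (1 + r) _ hocc
    have hjj1 : j1 = j := by omega
    rw [hjj1] at hcnt1
    rw [hacc, List.getElem?_eq_getElem hj]
    simp only [Option.map_some, Option.some.injEq]
    have hk : ((((items.map pvUrlOf).take (j + 1)).count u : Nat) : Int) = 2 + (r : Int) := by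
      rw [hcnt1]; push_cast; ring
    simp only [pvF, ← hu]
    rw [hk, if_neg (by simp; omega)]


-- ===== VERDICT (by name: the statement is the Claim_ definition above) =====
theorem make_unique_urls_spec : Claim_equal_make_unique_urls := by
  intro items _ _
  unfold Spec_make_unique_urls
  apply List.ext_getElem?
  intro j
  rw [pvA_getElem?, pvB_getElem?]
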